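-- pv_equiv track=rewrite | github.com/tyrl76/Algorithm | 백준/순열/10819 차이를 최대로.py | next_permutation
-- ===== SOURCE A (Python) =====
-- def next_permutation(list_a):
--     k = -1
--     m = -1
--
--     # 증가하는 마지막 부분을 가리키는 index k 찾기
--     for i in range(len(list_a)-1):
--         if list_a[i] < list_a[i+1]:
--             k = i
--
--     # 전체 내림차순일 경우, 반환
--     if k == -1:
--         return [-1]
--
--     # index k 이후 부분 중 값이 k보다 크면서 가장 멀리 있는 index m 찾기
--     for i in range(k, len(list_a)):
--         if list_a[k] < list_a[i]:
--             m = i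
--
--     # k와 m의 값 바꾸기
--     list_a[k], list_a[m] = list_a[m], list_a[k]
--
--     # k index 이후 오름차순 정렬
--     list_a = list_a[:k+1] + sorted(list_a[k+1:])
--     return list_a
-- ===== SOURCE B (Python) =====
-- def next_permutation(list_a):
--     # Linear-scan next-permutation: scan from the right for the pivot, pick the rightmost
--     # larger element, and REVERSE the (descending) suffix instead of sorting it.
--     # Equivalence is about the return value; A also swaps two elements of its argument
--     # in place (B does not mutate).
--     n = len(list_a)
--     pivot = None
--     for i in range(n - 2, -1, -1):
--         if list_a[i] < list_a[i + 1]: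
--             pivot = i
--             break
--     if pivot is None:
--         return [-1]
--     for j in range(n - 1, pivot, -1):
--         if list_a[j] > list_a[pivot]:
--             break
--     out = list_a[:pivot] + [list_a[j]]
--     tail = list_a[pivot + 1:]
--     tail[j - pivot - 1] = list_a[pivot]
--     return out + tail[::-1]
-- ===== Notes on version B (the rewrite author's own statement) =====
-- stated objective: alternative
-- what changed: B finds the pivot and the rightmost larger element by right-to-left scans with early exit and reverses the already-descending suffix, instead of A's two full left-to-right scans plus a sort of the suffix.
import Mathlib
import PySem

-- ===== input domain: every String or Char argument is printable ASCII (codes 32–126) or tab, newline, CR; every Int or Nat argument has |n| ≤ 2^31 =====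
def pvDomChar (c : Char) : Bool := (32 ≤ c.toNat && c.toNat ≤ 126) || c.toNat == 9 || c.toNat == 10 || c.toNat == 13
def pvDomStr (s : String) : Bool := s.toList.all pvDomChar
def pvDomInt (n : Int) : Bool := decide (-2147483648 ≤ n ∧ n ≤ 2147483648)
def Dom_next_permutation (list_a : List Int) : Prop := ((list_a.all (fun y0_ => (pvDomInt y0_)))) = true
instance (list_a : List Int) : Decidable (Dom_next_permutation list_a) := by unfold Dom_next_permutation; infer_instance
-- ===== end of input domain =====

-- B replaces A's full left-to-right scans and its sort of the suffix by right-to-left scans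
-- with early exit and a reversal of the already-descending suffix. The equivalence is about
-- the RETURN value: A also swaps two elements of its argument in place (B does not mutate).

-- ===== PORT A =====
def next_permutation (list_a : List Int) : List Int :=
  -- k = last i in range(len-1) with list_a[i] < list_a[i+1], else -1
  let k := (PySem.List.pyRange 0 ((list_a.length : Int) - 1) 1).foldl
    (fun k i => if PySem.List.pyGetD list_a i 0 < PySem.List.pyGetD list_a (i + 1) 0 then i else k) (-1)
  if k = -1 then [-1]
  else
    -- m = last i in range(k, len) with list_a[k] < list_a[i], else -1 (never -1 here)
    let m := (PySem.List.pyRange k (list_a.length : Int) 1).foldl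
      (fun m i => if PySem.List.pyGetD list_a k 0 < PySem.List.pyGetD list_a i 0 then i else m) (-1)
    -- list_a[k], list_a[m] = list_a[m], list_a[k]
    let l2 := PySem.List.pySetD (PySem.List.pySetD list_a k (PySem.List.pyGetD list_a m 0)) m
      (PySem.List.pyGetD list_a k 0)
    -- list_a[:k+1] + sorted(list_a[k+1:])
    PySem.List.slice l2 none (some (k + 1)) ++
      PySem.List.sorted (PySem.List.slice l2 (some (k + 1)) none) (fun x => x) false

-- ===== PORT B =====
def next_permutation_alt (list_a : List Int) : List Int :=
  let n : Int := list_a.length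
  -- for i in range(n-2, -1, -1): if list_a[i] < list_a[i+1]: pivot = i; break
  match (PySem.List.pyRange (n - 2) (-1) (-1)).find?
      (fun i => decide (PySem.List.pyGetD list_a i 0 < PySem.List.pyGetD list_a (i + 1) 0)) with
  | none => [-1]
  | some p =>
    -- for j in range(n-1, pivot, -1): if list_a[j] > list_a[pivot]: break
    -- (the break always fires, at some j ≥ p+1, since list_a[p] < list_a[p+1]; were there
    --  no break the loop variable would end at the range's last value p+1, the getD default)
    let j := ((PySem.List.pyRange (n - 1) p (-1)).find?
      (fun j => decide (PySem.List.pyGetD list_a p 0 < PySem.List.pyGetD list_a j 0))).getD (p + 1)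
    -- out = list_a[:pivot] + [list_a[j]]
    let out := PySem.List.slice list_a none (some p) ++ [PySem.List.pyGetD list_a j 0]
    -- tail = list_a[pivot+1:]; tail[j-pivot-1] = list_a[pivot]
    let tail := PySem.List.pySetD (PySem.List.slice list_a (some (p + 1)) none) (j - p - 1)
      (PySem.List.pyGetD list_a p 0)
    -- out + tail[::-1]   (tail[::-1] is tail.reverse — PySem.List.slice?_none_none_neg_one)
    out ++ tail.reverse

-- ===== PRECONDITION & SPEC =====
def Spec_next_permutation (list_a : List Int) (out : List Int) : Prop := out = next_permutation_alt list_a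
instance (list_a : List Int) (out : List Int) : Decidable (Spec_next_permutation list_a out) := by unfold Spec_next_permutation; infer_instance

-- ===== CLAIM (what is proved, stated in full; the proofs are below) =====
def Claim_equal_next_permutation : Prop := ∀ (list_a : List Int), Dom_next_permutation list_a → Spec_next_permutation list_a (next_permutation list_a)

-- ===== LEMMAS AND PROOFS =====

-- A's 'keep the last hit' fold is the first hit of the reversed scan order.
theorem pvFoldlLast (P : Int → Prop) [DecidablePred P] (l : List Int) (init : Int) :
    l.foldl (fun acc i => if P i then i else acc) init
      = (l.reverse.find? (fun i => decide (P i))).getD init := by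
  induction l generalizing init with
  | nil => rfl
  | cons a t ih =>
    rw [List.foldl_cons, ih, List.reverse_cons, List.find?_append]
    cases h : t.reverse.find? (fun i => decide (P i)) with
    | some x => rfl
    | none => by_cases hPa : P a <;> simp [List.find?, hPa]

-- find? over range(a, b, -1) returns the LARGEST index in (b, a] satisfying P.
theorem pvCountdownSome (P : Int → Bool) (a b x : Int)
    (h : (PySem.List.pyRange a b (-1)).find? P = some x) :
    b < x ∧ x ≤ a ∧ P x = true ∧ ∀ i, x < i → i ≤ a → P i = false := by
  by_cases hab : a ≤ b
  · rw [PySem.List.pyRange_neg_one_eq_nil hab] at h; simp at h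
  · rw [PySem.List.pyRange_neg_one_cons (by omega), List.find?_cons] at h
    cases hPa : P a with
    | true =>
      rw [hPa] at h
      obtain rfl : a = x := by simpa using h
      exact ⟨by omega, le_refl _, hPa, fun i h1 h2 => absurd h1 (by omega)⟩
    | false =>
      rw [hPa] at h
      have hab : b < a := by omega
      obtain ⟨ih1, ih2, ih3, ih4⟩ := pvCountdownSome P (a - 1) b x h
      refine ⟨ih1, by omega, ih3, fun i h1 h2 => ?_⟩
      rcases eq_or_lt_of_le h2 with rfl | hlt
      · exact hPa
      · exact ih4 i h1 (by omega)
termination_by (a - b).toNat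
decreasing_by omega

theorem pvCountdownNone (P : Int → Bool) (a b : Int)
    (h : (PySem.List.pyRange a b (-1)).find? P = none) :
    ∀ i, b < i → i ≤ a → P i = false := by
  intro i h1 h2
  simpa using List.find?_eq_none.mp h i (PySem.List.mem_pyRange_neg_one.mpr ⟨h1, h2⟩)

-- index congruence for dependent getElem
theorem pvIdx (l : List Int) {i j : Nat} (h : i = j) {hi : i < l.length} :
    l[i]'hi = l[j]'(h ▸ hi) := by subst h; rfl

-- the first k+1 elements after the swap at K < J
theorem pvTakeSwap (l : List Int) (K J : Nat) (a b : Int) (hKJ : K < J) (hK : K < l.length) :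
    ((l.set K a).set J b).take (K + 1) = l.take K ++ [a] := by
  rw [List.take_set, List.set_eq_of_length_le (by simp; omega), List.take_set,
    List.set_eq_take_cons_drop _ (by simp; omega)]
  simp [List.take_take]

-- the suffix after the swap at K < J
theorem pvDropSwap (l : List Int) (K J : Nat) (a b : Int) (hKJ : K < J) :
    ((l.set K a).set J b).drop (K + 1) = (l.drop (K + 1)).set (J - K - 1) b := by
  rw [List.drop_set, if_neg (by omega), List.drop_set, if_pos (by omega), Nat.sub_sub]

-- sorting a non-increasing list of ints is reversing it
theorem pvSortedDesc (t : List Int) (h : List.Pairwise (fun x y : Int => y ≤ x) t) :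
    PySem.List.sorted t (fun x => x) false = t.reverse := by
  apply PySem.List.sorted_id_eq_of_perm_of_pairwise
  · exact t.reverse_perm
  · rw [List.pairwise_reverse]; exact h

-- the suffix after the swap is still non-increasing
theorem pvTailDesc (l : List Int) (K J : Nat) (hK : K < l.length) (hJ : J < l.length) (hKJ : K < J)
    (hdesc : ∀ i : Nat, K < i → ∀ _h : i + 1 < l.length, l[i + 1] ≤ l[i]'(by omega))
    (hKJlt : l[K] < l[J])
    (hafter : ∀ i : Nat, J < i → ∀ _h : i < l.length, l[i] ≤ l[K]) :
    List.Pairwise (fun x y : Int => y ≤ x) ((l.drop (K + 1)).set (J - K - 1) l[K]) := by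
  haveI : Trans (fun x y : Int => y ≤ x) (fun x y : Int => y ≤ x) (fun x y : Int => y ≤ x) :=
    ⟨fun h1 h2 => le_trans h2 h1⟩
  apply List.IsChain.pairwise
  rw [List.isChain_iff_getElem]
  intro i hi
  simp only [List.length_set, List.length_drop] at hi
  rw [List.getElem_set, List.getElem_set, List.getElem_drop, List.getElem_drop]
  by_cases h1 : J - K - 1 = i
  · rw [if_pos h1, if_neg (by omega)]
    exact hafter (K + 1 + (i + 1)) (by omega) (by omega)
  · rw [if_neg h1]
    by_cases h2 : J - K - 1 = i + 1
    · rw [if_pos h2]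
      obtain rfl : J = K + i + 2 := by omega
      have hd := hdesc (K + i + 1) (by omega) (by omega)
      calc l[K] ≤ l[K + i + 2]'(by omega) := lt_of_lt_of_le hKJlt (le_of_eq (pvIdx l (by omega))) |>.le
        _ = l[K + i + 1 + 1]'(by omega) := pvIdx l (by omega)
        _ ≤ l[K + i + 1]'(by omega) := hd
        _ = l[K + 1 + i]'(by omega) := pvIdx l (by omega)
    · rw [if_neg h2]
      have hd := hdesc (K + 1 + i) (by omega) (by omega)
      calc l[K + 1 + (i + 1)]'(by omega) = l[K + 1 + i + 1]'(by omega) := pvIdx l (by omega)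
        _ ≤ l[K + 1 + i]'(by omega) := hd

-- ===== VERDICT (by name: the statement is the Claim_ definition above) =====
theorem next_permutation_spec : Claim_equal_next_permutation := by
  intro l _
  unfold Spec_next_permutation next_permutation next_permutation_alt
  dsimp only
  generalize hK : (PySem.List.pyRange 0 ((l.length : Int) - 1) 1).foldl
    (fun k i => if PySem.List.pyGetD l i 0 < PySem.List.pyGetD l (i + 1) 0 then i else k) (-1) = kv
  rw [pvFoldlLast] at hK
  have hrev1 : (PySem.List.pyRange 0 ((l.length : Int) - 1) 1).reverse
      = PySem.List.pyRange ((l.length : Int) - 2) (-1) (-1) := by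
    rw [PySem.List.pyRange_neg_one_eq_reverse,
      (by omega : (-1 : Int) + 1 = 0), (by omega : (l.length : Int) - 2 + 1 = (l.length : Int) - 1)]
  rw [hrev1] at hK
  cases hp : (PySem.List.pyRange ((l.length : Int) - 2) (-1) (-1)).find?
      (fun i => decide (PySem.List.pyGetD l i 0 < PySem.List.pyGetD l (i + 1) 0)) with
  | none =>
    rw [hp] at hK
    simp only [Option.getD_none] at hK
    subst hK
    norm_num
  | some p =>
    rw [hp] at hK
    simp only [Option.getD_some] at hK
    subst hK
    obtain ⟨hp1, hp2, hp3, hp4⟩ := pvCountdownSome _ _ _ _ hp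
    rw [if_neg (by omega : ¬ p = -1)]
    dsimp only
    generalize hM : (PySem.List.pyRange p (l.length : Int) 1).foldl
      (fun m i => if PySem.List.pyGetD l p 0 < PySem.List.pyGetD l i 0 then i else m) (-1) = mv
    rw [pvFoldlLast] at hM
    have hsplit : (PySem.List.pyRange p (l.length : Int) 1).reverse
        = PySem.List.pyRange ((l.length : Int) - 1) p (-1) ++ [p] := by
      rw [PySem.List.pyRange_one_cons (by omega : p < (l.length : Int)), List.reverse_cons]
      congr 1
      rw [PySem.List.pyRange_neg_one_eq_reverse,
        (by omega : (l.length : Int) - 1 + 1 = (l.length : Int))]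
    rw [hsplit, List.find?_append] at hM
    have hnopivot : List.find? (fun j => decide (PySem.List.pyGetD l p 0 < PySem.List.pyGetD l j 0)) [p] = none := by
      simp
    rw [hnopivot] at hM
    cases hjf : (PySem.List.pyRange ((l.length : Int) - 1) p (-1)).find?
        (fun j => decide (PySem.List.pyGetD l p 0 < PySem.List.pyGetD l j 0)) with
    | none =>
      exfalso
      have := pvCountdownNone _ _ _ hjf (p + 1) (by omega) (by omega)
      simp only [decide_eq_true_eq] at hp3
      simp only [decide_eq_false_iff_not] at this
      exact this hp3
    | some j =>
      rw [hjf] at hM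
      simp at hM
      subst mv
      obtain ⟨hj1, hj2, hj3, hj4⟩ := pvCountdownSome _ _ _ _ hjf
      simp only [Option.getD_some]
      obtain ⟨K, rfl⟩ : ∃ K : Nat, p = (K : Int) := ⟨p.toNat, by omega⟩
      obtain ⟨J, rfl⟩ : ∃ J : Nat, j = (J : Int) := ⟨j.toNat, by omega⟩
      have hK : K < l.length := by omega
      have hJ : J < l.length := by omega
      have hKJ : K < J := by omega
      have e1 : (K : Int) + 1 = ((K + 1 : Nat) : Int) := by omega
      have e2 : (J : Int) - K - 1 = ((J - K - 1 : Nat) : Int) := by omega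
      rw [e1, e2]
      simp only [PySem.List.pyGetD_natCast, PySem.List.pySetD_natCast,
        PySem.List.slice_to_natCast, PySem.List.slice_from_natCast]
      rw [pvTakeSwap l K J _ _ hKJ hK, pvDropSwap l K J _ _ hKJ,
        List.getD_eq_getElem l 0 hK, List.getD_eq_getElem l 0 hJ]
      have hdesc : ∀ i : Nat, K < i → ∀ _h : i + 1 < l.length, l[i + 1] ≤ l[i]'(by omega) := by
        intro i hKi h
        have hh := hp4 (i : Int) (by omega) (by omega)
        rw [(by omega : ((i : Int) + 1) = ((i + 1 : Nat) : Int)), PySem.List.pyGetD_natCast,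
          PySem.List.pyGetD_natCast, List.getD_eq_getElem l 0 (by omega : i < l.length),
          List.getD_eq_getElem l 0 h] at hh
        simpa using hh
      have hKJlt : l[K] < l[J] := by
        have hh := hj3
        rw [PySem.List.pyGetD_natCast, PySem.List.pyGetD_natCast,
          List.getD_eq_getElem l 0 hK, List.getD_eq_getElem l 0 hJ] at hh
        simpa using hh
      have hafter : ∀ i : Nat, J < i → ∀ _h : i < l.length, l[i] ≤ l[K] := by
        intro i hJi h
        have hh := hj4 (i : Int) (by omega) (by omega)
        rw [PySem.List.pyGetD_natCast, PySem.List.pyGetD_natCast,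
          List.getD_eq_getElem l 0 hK, List.getD_eq_getElem l 0 h] at hh
        simpa using hh
      rw [pvSortedDesc _ (pvTailDesc l K J hK hJ hKJ hdesc hKJlt hafter), List.append_assoc]
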